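-- pv_equiv track=rewrite | github.com/zhangkai98/ProgrammingForThePuzzledBook | Puzzle12/hanoi.py | aHanoi
-- ===== SOURCE A (Python) =====
-- def aHanoi(numRings, startPeg, endPeg):
--
--     numMoves = 0                   # counting number of moves made
--     if numRings == 1 :             # base case: move one ring from peg 1 to 2 to 3
--         print ('Move ring', numRings, 'from peg', startPeg, 'to peg', 6-startPeg-endPeg)
--         print ('Move ring', numRings, 'from peg', 6-startPeg-endPeg, 'to peg', endPeg)
--         numMoves += 2              # add two moves
--     else :
--         numMoves += aHanoi(numRings - 1, startPeg, endPeg)      # perform function on n-1 rings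
--         print ('Move ring', numRings, 'from peg', startPeg, 'to peg', 6-startPeg-endPeg)    # moves next largest ring between adjacent pegs
--         numMoves += 1              # add one move
--         numMoves += aHanoi(numRings - 1, endPeg, startPeg)                      # perform the function on n-1 rings, pegs in reverse
--         print ('Move ring', numRings, 'from peg', 6-startPeg-endPeg, 'to peg', endPeg)      # moves next largest ring between adjacent pegs
--         numMoves += 1              #add one move
--         numMoves += aHanoi(numRings - 1, startPeg, endPeg)                      # performs the function on n-1 rings
--
--     return numMoves
-- ===== SOURCE B (Python) =====
-- def aHanoi(numRings, startPeg, endPeg):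
--     # Moving k rings one peg further costs all of moving k-1 rings twice plus
--     # shifting ring k twice over the middle peg: cost(k) = 3*cost(k-1) + 2.
--     # (Returns the move count only; it does not emit A's per-move prints.)
--     numMoves = 0
--     for _ in range(numRings):
--         numMoves = 3 * numMoves + 2
--     return numMoves
-- ===== Notes on version B (the rewrite author's own statement) =====
-- stated objective: simpler
-- what changed: Replaces the print-and-count recursion by a single loop applying the linear recurrence numMoves = 3*numMoves + 2 once per ring (B emits no prints; the equivalence is about the return value).
import Mathlib
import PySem

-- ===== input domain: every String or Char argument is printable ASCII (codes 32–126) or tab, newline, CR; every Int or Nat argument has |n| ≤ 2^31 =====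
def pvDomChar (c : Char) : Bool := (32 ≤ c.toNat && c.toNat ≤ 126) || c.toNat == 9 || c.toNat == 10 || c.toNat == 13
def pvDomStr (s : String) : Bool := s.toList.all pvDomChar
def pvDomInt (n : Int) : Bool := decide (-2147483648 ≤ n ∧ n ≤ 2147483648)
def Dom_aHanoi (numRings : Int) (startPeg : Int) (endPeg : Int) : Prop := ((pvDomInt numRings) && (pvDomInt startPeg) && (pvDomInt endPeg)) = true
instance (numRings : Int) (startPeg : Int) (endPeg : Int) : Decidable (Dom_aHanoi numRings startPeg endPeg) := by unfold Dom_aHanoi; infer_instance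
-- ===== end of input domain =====

-- B computes the move count by the linear recurrence cost(k) = 3*cost(k-1) + 2 in one
-- loop over the rings, instead of A's print-and-count recursion; B emits no prints,
-- and the equivalence proved here is about the RETURN value only.

-- ===== PORT A =====
-- Literal port of A's recursion on numRings.  The 'numRings ≤ 0' guard only makes the
-- definition total: there the Python recurses forever (RecursionError), excluded by Pre_.
def aHanoi (numRings : Int) (startPeg : Int) (endPeg : Int) : Int :=
  if numRings ≤ 0 then 0
  else if numRings = 1 then 2
  else
    aHanoi (numRings - 1) startPeg endPeg + 1 +
    aHanoi (numRings - 1) endPeg startPeg + 1 +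
    aHanoi (numRings - 1) startPeg endPeg
termination_by numRings.toNat
decreasing_by all_goals omega

-- ===== PORT B =====
-- Source B: a for-loop over range(numRings) applying the recurrence numMoves = 3*numMoves + 2.
def aHanoi_alt (numRings : Int) (startPeg : Int) (endPeg : Int) : Int :=
  (PySem.List.pyRange 0 numRings 1).foldl (fun numMoves _ => 3 * numMoves + 2) 0

-- ===== PRECONDITION & SPEC =====
-- Pre_ excludes exactly numRings ≤ 0, where Python A raises RecursionError.
def Pre_aHanoi (numRings : Int) (startPeg : Int) (endPeg : Int) : Prop := 1 ≤ numRings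
instance (numRings : Int) (startPeg : Int) (endPeg : Int) : Decidable (Pre_aHanoi numRings startPeg endPeg) := by unfold Pre_aHanoi; infer_instance
def pvWitness_aHanoi : Int × Int × Int := (3, 1, 3)

def Spec_aHanoi (numRings : Int) (startPeg : Int) (endPeg : Int) (out : Int) : Prop := out = aHanoi_alt numRings startPeg endPeg
instance (numRings : Int) (startPeg : Int) (endPeg : Int) (out : Int) : Decidable (Spec_aHanoi numRings startPeg endPeg out) := by unfold Spec_aHanoi; infer_instance

-- ===== CLAIM (what is proved, stated in full; the proofs are below) =====
def Claim_equal_aHanoi : Prop := ∀ (numRings : Int) (startPeg : Int) (endPeg : Int), Dom_aHanoi numRings startPeg endPeg → Pre_aHanoi numRings startPeg endPeg → Spec_aHanoi numRings startPeg endPeg (aHanoi numRings startPeg endPeg)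

-- ===== LEMMAS AND PROOFS =====

-- the loop's fold depends only on the list's length: after l, the accumulator c becomes 3^|l|*(c+1) - 1
theorem foldl_step (l : List Int) : ∀ c : Int,
    l.foldl (fun numMoves _ => 3 * numMoves + 2) c = 3 ^ l.length * (c + 1) - 1 := by
  induction l with
  | nil => intro c; simp
  | cons a l ih =>
    intro c
    simp only [List.foldl_cons, ih, List.length_cons, pow_succ]
    ring

theorem aHanoi_alt_closed (n s e : Int) (hn : 1 ≤ n) :
    aHanoi_alt n s e = 3 ^ n.toNat - 1 := by
  unfold aHanoi_alt
  rw [foldl_step, PySem.List.length_pyRange_one]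
  norm_num

theorem aHanoi_closed (n s e : Int) (hn : 1 ≤ n) :
    aHanoi n s e = 3 ^ n.toNat - 1 := by
  generalize hk : n.toNat = k
  induction k generalizing n s e with
  | zero => omega
  | succ k ih =>
    by_cases h1 : n = 1
    · subst h1
      rw [aHanoi]
      have hk0 : k = 0 := by omega
      subst hk0
      norm_num
    · have hn2 : 2 ≤ n := by omega
      rw [aHanoi]
      rw [if_neg (by omega), if_neg h1]
      have hk' : (n - 1).toNat = k := by omega
      rw [ih (n - 1) s e (by omega) hk', ih (n - 1) e s (by omega) hk']
      rw [pow_succ]; ring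

-- ===== VERDICT (by name: the statement is the Claim_ definition above) =====
theorem aHanoi_spec : Claim_equal_aHanoi := by
  intro n s e _ hpre
  unfold Spec_aHanoi
  rw [aHanoi_closed n s e hpre, aHanoi_alt_closed n s e hpre]
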